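-- pv_equiv track=rewrite | github.com/dpudovkin/vk-education-python-course | dz9/task1/parser.py | clean_wordlist
-- ===== SOURCE A (Python) =====
-- def clean_wordlist(wordlist):
--     clean_list = []
--     for word in wordlist:
--         symbols = "!@#$%^&*()_-+={[}]|\;:\"<>?/., "
--
--         for i in range(len(symbols)):
--             word = word.replace(symbols[i], '')
--
--         if len(word) > 0:
--             clean_list.append(word)
--     return word_dictionary(clean_list)
--
-- def word_dictionary(clean_list):
--     word_count = {}
--     for word in clean_list:
--         if word in word_count:
--             word_count[word] += 1
--         else:
--             word_count[word] = 1
--     return word_count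
-- ===== SOURCE B (Python) =====
-- def clean_wordlist(wordlist):
--     symbols = set("!@#$%^&*()_-+={[}]|\\;:\"<>?/., ")
--     counts = {}
--     for word in wordlist:
--         cleaned = ''.join(c for c in word if c not in symbols)
--         if cleaned:
--             counts[cleaned] = counts.get(cleaned, 0) + 1
--     return counts
-- ===== Notes on version B (the rewrite author's own statement) =====
-- stated objective: simpler
-- what changed: A runs 28 whole-word str.replace passes per word (one per symbol) and counts in a separate helper; B makes a single pass over each word's characters keeping those outside a symbol set and counts in the same loop with dict.get.
import Mathlib
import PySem

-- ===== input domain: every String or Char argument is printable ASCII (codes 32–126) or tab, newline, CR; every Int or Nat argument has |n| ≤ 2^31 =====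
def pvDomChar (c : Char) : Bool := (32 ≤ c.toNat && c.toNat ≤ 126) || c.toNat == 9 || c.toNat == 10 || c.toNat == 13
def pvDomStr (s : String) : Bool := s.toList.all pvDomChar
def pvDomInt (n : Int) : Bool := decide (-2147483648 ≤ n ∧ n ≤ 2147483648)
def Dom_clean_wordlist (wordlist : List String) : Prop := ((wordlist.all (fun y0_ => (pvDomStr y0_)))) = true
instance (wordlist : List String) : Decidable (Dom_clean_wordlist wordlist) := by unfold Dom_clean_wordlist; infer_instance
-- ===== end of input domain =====

-- B replaces A's 28 whole-word replace passes by a single pass over each word's characters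
-- (keep characters not in the symbol set) and counts in the same loop (objective: simpler).
-- Both programs agree on every input; no Pre_ is needed (A is total).

-- ===== PORT A =====
-- the literal symbols string from A ('\;' in the Python source is a backslash then ';')
def pvSymbols : String := "!@#$%^&*()_-+={[}]|\\;:\"<>?/., "

def word_dictionary (clean_list : List String) : List (String × Int) :=
  (clean_list.foldl (fun word_count word =>
      if word_count.contains word then
        word_count.insert word (word_count.getD word 0 + 1)
      else
        word_count.insert word 1) PySem.Dict.empty).items

def clean_wordlist (wordlist : List String) : List (String × Int) :=
  let clean_list := wordlist.foldl (fun clean_list word =>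
    -- for i in range(len(symbols)): word = word.replace(symbols[i], '')
    -- (the index i is always in range, so the .getD default is never used)
    let word := (PySem.List.pyRange 0 (PySem.Str.len pvSymbols) 1).foldl
      (fun w i => PySem.Str.replace w (String.mk [((PySem.Str.pyGet? pvSymbols i).getD ' ')]) "") word
    if 0 < PySem.Str.len word then clean_list ++ [word] else clean_list) []
  word_dictionary clean_list

-- ===== PORT B =====
def clean_wordlist_alt (wordlist : List String) : List (String × Int) :=
  let symbols : PySem.Set Char := PySem.Set.ofList "!@#$%^&*()_-+={[}]|\\;:\"<>?/., ".toList
  (wordlist.foldl (fun counts word =>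
      let cleaned := String.mk (word.toList.filter (fun c => !(symbols.contains c)))
      if cleaned ≠ "" then counts.insert cleaned (counts.getD cleaned 0 + 1)
      else counts) PySem.Dict.empty).items

-- ===== PRECONDITION & SPEC =====
def Spec_clean_wordlist (wordlist : List String) (out : List (String × Int)) : Prop := out = clean_wordlist_alt wordlist
instance (wordlist : List String) (out : List (String × Int)) : Decidable (Spec_clean_wordlist wordlist out) := by unfold Spec_clean_wordlist; infer_instance

-- ===== CLAIM (what is proved, stated in full; the proofs are below) =====
def Claim_equal_clean_wordlist : Prop := ∀ (wordlist : List String), Dom_clean_wordlist wordlist → Spec_clean_wordlist wordlist (clean_wordlist wordlist)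

-- ===== LEMMAS AND PROOFS =====

theorem pv_toList_mk (l : List Char) : (String.mk l).toList = l :=
  Eq.symm (String.ofList_eq.mp rfl)

-- replace with a one-character pattern and empty replacement is a filter
theorem replace_go_single (c : Char) (l acc : List Char) (fuel : Nat) (h : l.length ≤ fuel) :
    PySem.Chars.replace.go [c] [] fuel l acc = acc.reverse ++ l.filter (· ≠ c) := by
  induction l generalizing fuel acc with
  | nil =>
    cases fuel <;> simp [PySem.Chars.replace.go]
  | cons x t ih =>
    cases fuel with
    | zero => simp at h
    | succ n =>
      simp only [List.length_cons, Nat.add_le_add_iff_right] at h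
      simp only [PySem.Chars.replace.go]
      by_cases hx : x = c
      · subst hx
        rw [if_pos (by simp [List.isPrefixOf])]
        simp [ih _ _ h]
      · rw [if_neg (by simp [List.isPrefixOf, Ne.symm hx])]
        rw [ih _ _ h]
        simp [hx]

theorem replace_single (c : Char) (l : List Char) :
    PySem.Chars.replace l [c] [] = l.filter (· ≠ c) := by
  rw [PySem.Chars.replace]
  rw [if_neg (by simp)]
  simpa using replace_go_single c l [] l.length le_rfl

-- folding single-char filters = one filter against the whole symbol list
theorem fold_filter (syms w : List Char) :
    syms.foldl (fun w c => w.filter (· ≠ c)) w = w.filter (fun c => !(syms.contains c)) := by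
  induction syms generalizing w with
  | nil => simp
  | cons s rest ih =>
    rw [List.foldl_cons, ih, List.filter_filter]
    apply List.filter_congr
    intro c _
    by_cases hs : c = s <;> by_cases hr : rest.contains c <;> simp_all

theorem fold_replace_filter (syms w : List Char) :
    syms.foldl (fun w c => PySem.Chars.replace w [c] []) w
      = w.filter (fun c => !(syms.contains c)) := by
  rw [show (fun (w : List Char) (c : Char) => PySem.Chars.replace w [c] [])
        = (fun (w : List Char) (c : Char) => w.filter (· ≠ c)) from
      funext fun w => funext fun c => replace_single c w]
  exact fold_filter syms w

theorem str_fold_toList (syms : List Char) (w : String) :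
    (syms.foldl (fun w c => PySem.Str.replace w (String.mk [c]) "") w).toList
      = syms.foldl (fun w c => PySem.Chars.replace w [c] []) w.toList := by
  induction syms generalizing w with
  | nil => rfl
  | cons s rest ih =>
    simp only [List.foldl_cons, ih, PySem.Str.toList_replace, pv_toList_mk]
    rfl

-- the cleaned word, as a character filter
def pvClean (w : String) : String :=
  String.mk (w.toList.filter (fun c => !(pvSymbols.toList.contains c)))

theorem index_fold_eq_char_fold (w : String) :
    (PySem.List.pyRange 0 (PySem.Str.len pvSymbols) 1).foldl
      (fun w i => PySem.Str.replace w (String.mk [((PySem.Str.pyGet? pvSymbols i).getD ' ')]) "") w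
    = pvSymbols.toList.foldl (fun w c => PySem.Str.replace w (String.mk [c]) "") w := by
  rfl

theorem cleanA_eq (w : String) :
    (PySem.List.pyRange 0 (PySem.Str.len pvSymbols) 1).foldl
      (fun w i => PySem.Str.replace w (String.mk [((PySem.Str.pyGet? pvSymbols i).getD ' ')]) "") w
    = pvClean w := by
  rw [index_fold_eq_char_fold, ← String.toList_inj, str_fold_toList, fold_replace_filter]
  rw [pvClean, pv_toList_mk]

theorem cleanB_eq (w : String) :
    String.mk (w.toList.filter (fun c => !((PySem.Set.ofList "!@#$%^&*()_-+={[}]|\\;:\"<>?/., ".toList).contains c)))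
      = pvClean w := by
  rw [pvClean]
  congr 1

theorem cond_eq (w : String) :
    decide (0 < PySem.Str.len (pvClean w)) = decide (pvClean w ≠ "") := by
  simp only [PySem.Str.len_eq, decide_eq_decide]
  constructor
  · intro h hv
    rw [hv] at h
    simp at h
  · intro h
    rcases Nat.eq_zero_or_pos (pvClean w).toList.length with h0 | h0
    · exact absurd (by rw [← String.toList_inj]; simpa using List.length_eq_zero_iff.mp h0) h
    · exact_mod_cast h0

theorem step_eq (d : PySem.Dict String Int) (w : String) :
    (if d.contains w then d.insert w (d.getD w 0 + 1) else d.insert w 1)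
      = d.insert w (d.getD w 0 + 1) := by
  by_cases h : d.contains w
  · rw [if_pos h]
  · rw [if_neg h, PySem.Dict.getD_of_not_contains _ _ (by simpa using h)]
    norm_num

-- B\'s one-pass loop, restated as a fold over the cleaned nonempty words
theorem B_fold (wl : List String) (d : PySem.Dict String Int) :
    wl.foldl (fun counts word =>
        if pvClean word ≠ "" then counts.insert (pvClean word) (counts.getD (pvClean word) 0 + 1)
        else counts) d
    = ((wl.filter (fun w => decide (pvClean w ≠ ""))).map pvClean).foldl
        (fun d w => d.insert w (d.getD w 0 + 1)) d := by
  induction wl generalizing d with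
  | nil => rfl
  | cons x t ih =>
    rw [List.foldl_cons, List.filter_cons]
    by_cases h : pvClean x ≠ ""
    · rw [if_pos h, if_pos (by simpa using h), List.map_cons, List.foldl_cons, ih]
    · rw [if_neg h, if_neg (by simpa using h), ih]

-- ===== VERDICT (by name: the statement is the Claim_ definition above) =====
theorem clean_wordlist_spec : Claim_equal_clean_wordlist := by
  intro wordlist _
  unfold Spec_clean_wordlist clean_wordlist clean_wordlist_alt word_dictionary
  simp only [cleanA_eq, cleanB_eq]
  rw [PySem.List.foldl_append_ite (fun w => 0 < PySem.Str.len (pvClean w)) pvClean]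
  rw [B_fold]
  rw [show (fun w => decide (0 < PySem.Str.len (pvClean w))) = (fun w => decide (pvClean w ≠ "")) from
        funext fun w => cond_eq w]
  simp only [List.nil_append, step_eq]
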